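-- pv_equiv track=rewrite | github.com/chandanthota75/100DaysOfCodingChallenge | Day54/Day54 Solution.py | repeatedRows
-- ===== SOURCE A (Python) =====
-- def repeatedRows(arr, m ,n):
--     d = {}
--     for i in range(m):
--         s=""
--         for j in range(n):
--             s += str(arr[i][j])
--         if s not in d:
--             d[s] = [0]
--         else:
--             d[s].append(i)
--     res = []
--     for i in d:
--         if(len(d[i]) >= 2):
--             res.extend(d[i][1:])
--     return sorted(res)
-- ===== SOURCE B (Python) =====
-- def repeatedRows(arr, m, n):
--     sigs = []
--     for i in range(m):
--         s = ""
--         for j in range(n):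
--             s += str(arr[i][j])
--         sigs.append(s)
--     order = sorted(range(m), key=lambda i: (sigs[i], i))
--     res = []
--     for prev, cur in zip(order, order[1:]):
--         if sigs[prev] == sigs[cur]:
--             res.append(cur)
--     return sorted(res)
-- ===== Notes on version B (the rewrite author's own statement) =====
-- stated objective: alternative
-- what changed: A groups row indices per signature in a dict and extracts each group's tail in a second pass before sorting; B sorts the row indices by (signature, index) and collects the second index of every adjacent pair with equal signatures — sort-then-scan instead of hash-grouping.
import Mathlib
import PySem

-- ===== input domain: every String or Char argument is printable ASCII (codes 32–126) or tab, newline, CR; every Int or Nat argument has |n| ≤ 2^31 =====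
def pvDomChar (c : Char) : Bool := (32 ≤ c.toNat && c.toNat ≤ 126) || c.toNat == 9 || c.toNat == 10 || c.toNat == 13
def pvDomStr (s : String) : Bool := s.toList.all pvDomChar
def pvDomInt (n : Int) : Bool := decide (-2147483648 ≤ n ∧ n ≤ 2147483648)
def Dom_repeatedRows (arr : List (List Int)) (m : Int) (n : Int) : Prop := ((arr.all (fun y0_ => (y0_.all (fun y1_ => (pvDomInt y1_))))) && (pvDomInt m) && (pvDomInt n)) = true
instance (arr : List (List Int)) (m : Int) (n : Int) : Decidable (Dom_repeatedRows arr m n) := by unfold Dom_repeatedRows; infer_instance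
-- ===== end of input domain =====

-- B replaces A's hash-grouping (dict of index lists, second pass over the groups, final sort)
-- by sort-then-scan: sort the row indices by (signature, index) and collect the second element
-- of every adjacent pair with equal signatures (alternative algorithm; return values only).

-- ===== PORT A =====
-- shared helper: the row signature  s = ""; for j in range(n): s += str(arr[i][j])
-- (this inner loop is textually identical in A and in B, so both ports use it)
def pvRowSig (arr : List (List Int)) (n : Int) (i : Int) : String :=
  (PySem.List.pyRange 0 n 1).foldl
    (fun s j => s ++ PySem.Int.toStr (PySem.List.pyGetD (PySem.List.pyGetD arr i []) j 0)) ""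

def repeatedRows (arr : List (List Int)) (m : Int) (n : Int) : List Int :=
  let d : PySem.Dict String (List Int) :=
    (PySem.List.pyRange 0 m 1).foldl
      (fun d i =>
        let s := pvRowSig arr n i
        if d.contains s = false then d.insert s [0]
        else d.modify s [] (fun v => v ++ [i]))
      PySem.Dict.empty
  let res : List Int :=
    d.keys.foldl
      (fun res k =>
        let v := d.getD k []
        if 2 ≤ PySem.List.len v then res ++ PySem.List.slice v (some 1) none else res)
      []
  PySem.List.sorted res (fun x => x) false

-- ===== PORT B =====
-- sigs[i] for an index i that B only ever takes from range(m); 'order' is Python's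
-- sorted(range(m), key=lambda i: (sigs[i], i)) — the tuple key is the lexicographic key 'toLex'
def repeatedRows_alt (arr : List (List Int)) (m : Int) (n : Int) : List Int :=
  let sigs : List String :=
    (PySem.List.pyRange 0 m 1).foldl (fun sigs i => sigs ++ [pvRowSig arr n i]) []
  let order : List Int :=
    PySem.List.sorted (PySem.List.pyRange 0 m 1)
      (fun i => toLex (PySem.List.pyGetD sigs i "", i)) false
  let res : List Int :=
    (List.zip order (PySem.List.slice order (some 1) none)).foldl
      (fun res p =>
        if PySem.List.pyGetD sigs p.1 "" == PySem.List.pyGetD sigs p.2 "" then res ++ [p.2]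
        else res)
      []
  PySem.List.sorted res (fun x => x) false

-- ===== PRECONDITION & SPEC =====
-- Pre_ excludes exactly the inputs where Python A raises an IndexError: when 0 < n,
-- some row index i < m is outside arr, or some row arr[i], i < m, is shorter than n
-- (when n ≤ 0 the expression arr[i][j] is never evaluated, so A never raises).
def Pre_repeatedRows (arr : List (List Int)) (m : Int) (n : Int) : Prop :=
  0 < n → (m.toNat ≤ arr.length ∧ ∀ row ∈ arr.take m.toNat, n.toNat ≤ row.length)
instance (arr : List (List Int)) (m : Int) (n : Int) : Decidable (Pre_repeatedRows arr m n) := by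
  unfold Pre_repeatedRows; infer_instance

def pvWitness_repeatedRows : List (List Int) × Int × Int := ([[1, 2], [3, 4], [1, 2]], 3, 2)

def Spec_repeatedRows (arr : List (List Int)) (m : Int) (n : Int) (out : List Int) : Prop := out = repeatedRows_alt arr m n
instance (arr : List (List Int)) (m : Int) (n : Int) (out : List Int) : Decidable (Spec_repeatedRows arr m n out) := by unfold Spec_repeatedRows; infer_instance

-- ===== CLAIM (what is proved, stated in full; the proofs are below) =====
def Claim_equal_repeatedRows : Prop := ∀ (arr : List (List Int)) (m : Int) (n : Int), Dom_repeatedRows arr m n → Pre_repeatedRows arr m n → Spec_repeatedRows arr m n (repeatedRows arr m n)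

-- ===== LEMMAS AND PROOFS =====

/-- Shape of a dict value A builds for occurrence list `occ`: `[0]` at the first
occurrence, later occurrence indices appended. -/
def pvTail : List Int → List Int
  | [] => []
  | _ :: t => (0 : Int) :: t

/-- A's grouping loop, named for the proofs (defeq to the fold inside `repeatedRows`). -/
def pvFoldA (σ : Int → String) (l : List Int) : PySem.Dict String (List Int) :=
  l.foldl (fun d i =>
      if d.contains (σ i) = false then d.insert (σ i) [0]
      else d.modify (σ i) [] (fun v => v ++ [i])) PySem.Dict.empty

/-- A's result before sorting, named for the proofs (defeq to `res` inside `repeatedRows`). -/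
def pvResA (σ : Int → String) (l : List Int) : List Int :=
  (pvFoldA σ l).keys.foldl
    (fun res k =>
      let v := (pvFoldA σ l).getD k []
      if 2 ≤ PySem.List.len v then res ++ PySem.List.slice v (some 1) none else res)
    []

/-- B's adjacent-pair scan over a sorted index list, in structural form. -/
def pvDup (σ : Int → String) : List Int → List Int
  | [] => []
  | [_] => []
  | a :: b :: t => (if σ a = σ b then [b] else []) ++ pvDup σ (b :: t)

/-- The strict (signature, index) lexicographic order B's sort arranges the indices in. -/
def pvR (σ : Int → String) (a b : Int) : Prop := σ a < σ b ∨ (σ a = σ b ∧ a < b)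

/-- What A's grouping loop leaves at key `s`, starting from dict `d`. -/
lemma foldA_getD (σ : Int → String) (l : List Int) :
    ∀ (d : PySem.Dict String (List Int)) (s : String),
      ((l.foldl (fun d i =>
          if d.contains (σ i) = false then d.insert (σ i) [0]
          else d.modify (σ i) [] (fun v => v ++ [i])) d).getD s [])
        = if d.contains s = true then d.getD s [] ++ l.filter (fun i => σ i == s)
          else pvTail (l.filter (fun i => σ i == s)) := by
  induction l with
  | nil =>
      intro d s
      by_cases h : d.contains s = true
      · simp [h]
      · rw [if_neg h, List.filter_nil]
        exact PySem.Dict.getD_of_not_contains d [] (by simpa using h)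
  | cons a t ih =>
      intro d s
      simp only [List.foldl_cons, List.filter_cons]
      by_cases hc : d.contains (σ a) = false
      · rw [if_pos hc, ih]
        by_cases hs : σ a = s
        · subst hs
          rw [if_pos (PySem.Dict.contains_insert_self d (σ a) [0]), if_neg (by simp [hc]),
              PySem.Dict.getD_insert_self, if_pos (by simp : (σ a == σ a) = true)]
          rfl
        · have hne : s ≠ σ a := fun h => hs h.symm
          have hcontains : (d.insert (σ a) [0]).contains s = d.contains s := by
            rw [PySem.Dict.contains_insert]
            simp [hne]
          rw [hcontains, PySem.Dict.getD_insert_of_ne _ _ _ hne,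
              if_neg (by simp [hs] : ¬((σ a == s) = true))]
      · rw [if_neg hc, ih]
        have hc' : d.contains (σ a) = true := by simpa using hc
        by_cases hs : σ a = s
        · subst hs
          have hcm : (d.modify (σ a) [] (fun v => v ++ [a])).contains (σ a) = true := by
            rw [PySem.Dict.contains_modify]; simp
          rw [if_pos hcm, if_pos hc', PySem.Dict.getD_modify_self,
              if_pos (by simp : (σ a == σ a) = true)]
          simp
        · have hne : s ≠ σ a := fun h => hs h.symm
          have hcm : (d.modify (σ a) [] (fun v => v ++ [a])).contains s = d.contains s := by
            rw [PySem.Dict.contains_modify]; simp [hne]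
          rw [hcm, PySem.Dict.getD_modify_of_ne _ _ _ hne,
              if_neg (by simp [hs] : ¬((σ a == s) = true))]

/-- The keys A's grouping loop produces: first occurrences of the signatures, in order. -/
lemma foldA_keys (σ : Int → String) (l : List Int) :
    ∀ (d : PySem.Dict String (List Int)),
      ((l.foldl (fun d i =>
          if d.contains (σ i) = false then d.insert (σ i) [0]
          else d.modify (σ i) [] (fun v => v ++ [i])) d).keys)
        = PySem.Set.update d.keys (l.map σ) := by
  induction l with
  | nil => intro d; simp [PySem.Set.update]
  | cons a t ih =>
      intro d
      simp only [List.foldl_cons, List.map_cons, PySem.Set.update_cons]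
      by_cases hc : d.contains (σ a) = false
      · rw [if_pos hc, ih, PySem.Dict.keys_insert_of_not_contains _ _ hc]
        congr 1
        have hmem : σ a ∉ d.keys := by
          intro hmem
          rw [← PySem.Dict.contains_iff_mem_keys] at hmem
          simp [hmem] at hc
        rw [PySem.Set.add_of_not_mem hmem]
      · rw [if_neg hc, ih]
        have hc' : d.contains (σ a) = true := by simpa using hc
        have hkeys : (d.modify (σ a) [] (fun v => v ++ [a])).keys = d.keys := by
          rw [PySem.Dict.keys_modify, PySem.Dict.keys_insert_of_contains _ _ hc']
        rw [hkeys]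
        congr 1
        rw [PySem.Set.add_of_mem (by rwa [← PySem.Dict.contains_iff_mem_keys])]

lemma mem_drop_one_iff {xs : List Int} (h : xs.Nodup) (i : Int) :
    i ∈ xs.drop 1 ↔ i ∈ xs ∧ xs.head? ≠ some i := by
  cases xs with
  | nil => simp
  | cons a t =>
      have ha : a ∉ t := (List.nodup_cons.mp h).1
      simp only [List.drop_succ_cons, List.drop_zero, List.mem_cons, List.head?_cons]
      constructor
      · intro hit
        refine ⟨Or.inr hit, ?_⟩
        simp only [ne_eq, Option.some.injEq]
        intro h'
        exact ha (h' ▸ hit)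
      · rintro ⟨hor, hne⟩
        rcases hor with h' | h'
        · exact absurd (by simp [h']) hne
        · exact h'

lemma nodup_flatMap_sig (σ : Int → String) (g : String → List Int)
    (hg : ∀ k, (g k).Nodup) (hσ : ∀ k i, i ∈ g k → σ i = k) :
    ∀ ks : List String, ks.Nodup → (ks.flatMap g).Nodup := by
  intro ks
  induction ks with
  | nil => intro _; simp
  | cons k ks' ih =>
      intro hnd
      have hk : k ∉ ks' := (List.nodup_cons.mp hnd).1
      have hks' : ks'.Nodup := (List.nodup_cons.mp hnd).2
      rw [List.flatMap_cons, List.nodup_append]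
      refine ⟨hg k, ih hks', ?_⟩
      intro i hi j hj
      rcases List.mem_flatMap.mp hj with ⟨k', hk', hjk'⟩
      intro hij
      subst hij
      have hkk : k = k' := (hσ k i hi).symm.trans (hσ k' i hjk')
      exact hk (hkk ▸ hk')

/-- A's pre-sort result is the concatenation, per distinct signature in first-occurrence
order, of all occurrence indices after the first. -/
lemma resA_eq_flatMap (σ : Int → String) (l : List Int) :
    pvResA σ l = (PySem.Set.ofList (l.map σ)).flatMap
      (fun k => (l.filter (fun j => σ j == k)).drop 1) := by
  have hkeys : (pvFoldA σ l).keys = PySem.Set.ofList (l.map σ) := by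
    rw [pvFoldA, foldA_keys, PySem.Dict.keys_empty, PySem.Set.update_nil_left]
  have hbody : ∀ (acc : List Int), ∀ k ∈ PySem.Set.ofList (l.map σ),
      (fun (res : List Int) k =>
        let v := (pvFoldA σ l).getD k []
        if 2 ≤ PySem.List.len v then res ++ PySem.List.slice v (some 1) none else res) acc k
      = (fun (res : List Int) k =>
          res ++ (l.filter (fun j => σ j == k)).drop 1) acc k := by
    intro acc k hk
    have hocc : ∃ o t', l.filter (fun j => σ j == k) = o :: t' := by
      rcases List.mem_map.mp ((PySem.Set.mem_ofList _ _).mp hk) with ⟨i, hi, hik⟩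
      have hif : i ∈ l.filter (fun j => σ j == k) :=
        List.mem_filter.mpr ⟨hi, by simp [hik]⟩
      cases hocc : l.filter (fun j => σ j == k) with
      | nil => rw [hocc] at hif; simp at hif
      | cons o t' => exact ⟨o, t', rfl⟩
    rcases hocc with ⟨o, t', hocc⟩
    have hv : (pvFoldA σ l).getD k [] = (0 : Int) :: t' := by
      rw [pvFoldA, foldA_getD, PySem.Dict.contains_empty]
      simp only [Bool.false_eq_true, if_false, hocc, pvTail]
    show (if 2 ≤ PySem.List.len ((pvFoldA σ l).getD k [])
          then acc ++ PySem.List.slice ((pvFoldA σ l).getD k []) (some 1) none else acc)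
        = acc ++ (l.filter (fun j => σ j == k)).drop 1
    rw [hv, hocc, PySem.List.slice_from_one]
    simp only [PySem.List.len_eq, List.length_cons, List.tail_cons,
      List.drop_succ_cons, List.drop_zero]
    cases t' with
    | nil =>
        rw [if_neg (by simp)]
        simp
    | cons x xs =>
        rw [if_pos (by push_cast [List.length_cons]; omega)]
  unfold pvResA
  rw [hkeys, PySem.List.foldl_congr_mem _ _ _ _ hbody,
      PySem.List.foldl_append_eq_flatMap]
  simp

/-- Membership in A's pre-sort result, for a strictly increasing index list. -/
lemma memA (σ : Int → String) (l : List Int) (hpl : l.Pairwise (· < ·)) (i : Int) :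
    (i ∈ (PySem.Set.ofList (l.map σ)).flatMap
        (fun k => (l.filter (fun j => σ j == k)).drop 1))
      ↔ i ∈ l ∧ ∃ j ∈ l, σ j = σ i ∧ j < i := by
  have hl : l.Nodup := hpl.imp fun h => ne_of_lt h
  have hhead : ∀ i ∈ l,
      ((l.filter (fun j => σ j == σ i)).head? ≠ some i ↔ ∃ j ∈ l, σ j = σ i ∧ j < i) := by
    intro i hi
    have hiF : i ∈ l.filter (fun j => σ j == σ i) := List.mem_filter.mpr ⟨hi, by simp⟩
    have hF : (l.filter (fun j => σ j == σ i)).Pairwise (· < ·) := hpl.filter _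
    cases hFe : l.filter (fun j => σ j == σ i) with
    | nil => rw [hFe] at hiF; simp at hiF
    | cons h t =>
        rw [hFe] at hiF hF
        constructor
        · intro hne
          have hhi : h ≠ i := by
            intro he; exact hne (by simp [he])
          have hit : i ∈ t := by
            rcases List.mem_cons.mp hiF with he | ht
            · exact absurd he.symm hhi
            · exact ht
          have hmemF : h ∈ l.filter (fun j => σ j == σ i) := by rw [hFe]; exact List.mem_cons_self ..
          rcases List.mem_filter.mp hmemF with ⟨hhl, hhs⟩
          exact ⟨h, hhl, by simpa using hhs, (List.pairwise_cons.mp hF).1 i hit⟩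
        · rintro ⟨j, hjl, hjs, hji⟩ heq
          have hhi : h = i := by simpa using heq
          have hjF : j ∈ l.filter (fun j' => σ j' == σ i) := List.mem_filter.mpr ⟨hjl, by simp [hjs]⟩
          rw [hFe] at hjF
          rcases List.mem_cons.mp hjF with he | ht
          · exact absurd ((he.trans hhi) ▸ hji) (lt_irrefl _)
          · have := (List.pairwise_cons.mp hF).1 j ht
            rw [hhi] at this
            exact absurd this (not_lt_of_gt hji)
  constructor
  · intro hmem
    rcases List.mem_flatMap.mp hmem with ⟨k, hk, hik⟩
    rw [mem_drop_one_iff (hl.filter _)] at hik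
    rcases hik with ⟨hif, hne⟩
    rcases List.mem_filter.mp hif with ⟨hil, hbeq⟩
    have hk' : σ i = k := by simpa using hbeq
    subst hk'
    exact ⟨hil, (hhead i hil).mp hne⟩
  · rintro ⟨hil, hex⟩
    rw [List.mem_flatMap]
    refine ⟨σ i, (PySem.Set.mem_ofList _ _).mpr (List.mem_map.mpr ⟨i, hil, rfl⟩), ?_⟩
    rw [mem_drop_one_iff (hl.filter _)]
    exact ⟨List.mem_filter.mpr ⟨hil, by simp⟩, (hhead i hil).mpr hex⟩

/-- B's zip-and-filter scan is the structural adjacent-pair scan. -/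
lemma zip_filter_eq_pvDup (σ : Int → String) :
    ∀ l : List Int,
      ((l.zip l.tail).filter (fun p => σ p.1 == σ p.2)).map Prod.snd = pvDup σ l := by
  intro l
  induction l with
  | nil => rfl
  | cons a t ih =>
      cases t with
      | nil => rfl
      | cons b t' =>
          simp only [List.tail_cons, List.zip_cons_cons, List.filter_cons] at *
          by_cases h : σ a = σ b
          · simp only [show ((σ a == σ b) = true) from by simp [h], if_pos, List.map_cons, pvDup,
              if_pos h, ih]
            rfl
          · simp only [show ((σ a == σ b)) = false from by simp [h], Bool.false_eq_true,
              if_false, pvDup, if_neg h, List.nil_append]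
            exact ih

lemma pvDup_sublist (σ : Int → String) : ∀ l : List Int, (pvDup σ l).Sublist l.tail := by
  intro l
  induction l with
  | nil => simp [pvDup]
  | cons a t ih =>
      cases t with
      | nil => simp [pvDup]
      | cons b t' =>
          simp only [pvDup, List.tail_cons] at ih ⊢
          by_cases h : σ a = σ b
          · rw [if_pos h, List.singleton_append]
            exact ih.cons₂ b
          · rw [if_neg h, List.nil_append]
            exact ih.cons b

/-- Membership in the adjacent-pair scan of a strictly (signature, index)-sorted list:
exactly the indices preceded (anywhere in the list) by a smaller index with the same
signature. -/
lemma mem_pvDup (σ : Int → String) (l : List Int) (hl : l.Pairwise (pvR σ)) (i : Int) :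
    i ∈ pvDup σ l ↔ i ∈ l ∧ ∃ j ∈ l, σ j = σ i ∧ j < i := by
  induction l with
  | nil => simp [pvDup]
  | cons a t ih =>
      cases t with
      | nil =>
          constructor
          · intro hmem
            simp [pvDup] at hmem
          · rintro ⟨hi, j, hj, -, hji⟩
            simp only [List.mem_singleton] at hi hj
            rw [hi, hj] at hji
            exact absurd hji (lt_irrefl _)
      | cons b t' =>
          have hab : pvR σ a b := (List.pairwise_cons.mp hl).1 b (List.mem_cons_self ..)
          have hl' : (b :: t').Pairwise (pvR σ) := (List.pairwise_cons.mp hl).2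
          have ihb := ih hl'
          simp only [pvDup, List.mem_append]
          constructor
          · rintro (hmem | hmem)
            · by_cases h : σ a = σ b
              · rw [if_pos h] at hmem
                have hib : i = b := by simpa using hmem
                subst hib
                have hlt : a < i := by
                  rcases hab with hlt | ⟨-, hlt⟩
                  · exact absurd (h ▸ hlt) (lt_irrefl _)
                  · exact hlt
                exact ⟨List.mem_cons.mpr (Or.inr (List.mem_cons_self ..)),
                  a, List.mem_cons_self .., h, hlt⟩
              · rw [if_neg h] at hmem
                simp at hmem
            · rcases ihb.mp hmem with ⟨hi, j, hj, hjs, hji⟩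
              exact ⟨List.mem_cons.mpr (Or.inr hi), j, List.mem_cons.mpr (Or.inr hj), hjs, hji⟩
          · rintro ⟨hi, j, hj, hjs, hji⟩
            have hia : i ≠ a := by
              intro he
              subst he
              rcases List.mem_cons.mp hj with he' | hjt
              · exact absurd (he' ▸ hji) (lt_irrefl _)
              · rcases (List.pairwise_cons.mp hl).1 j hjt with hlt | ⟨-, hlt⟩
                · exact absurd (hjs ▸ hlt) (lt_irrefl _)
                · exact absurd hji (not_lt_of_gt hlt)
            have hit : i ∈ b :: t' := by
              rcases List.mem_cons.mp hi with he | h'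
              · exact absurd he hia
              · exact h'
            rcases List.mem_cons.mp hj with hja | hjt
            · -- j = a : a has the same signature as i, so σ a = σ b and i inherits a
              -- same-signature predecessor (b itself, or i = b directly)
              subst hja
              rcases List.mem_cons.mp hit with hib | hit'
              · subst hib
                have h : σ j = σ i := hjs
                exact Or.inl (by rw [if_pos h]; exact List.mem_singleton.mpr rfl)
              · have hbi : pvR σ b i := (List.pairwise_cons.mp hl').1 i hit'
                have hsb : σ j = σ b := by
                  rcases hab with hlt | ⟨he, -⟩
                  · exfalso
                    rcases hbi with hlt' | ⟨he', -⟩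
                    · exact absurd (hjs ▸ (hlt.trans hlt')) (lt_irrefl _)
                    · exact absurd (hjs ▸ he' ▸ hlt) (lt_irrefl _)
                  · exact he
                have hbs : σ b = σ i := hsb.symm.trans hjs
                have hblt : b < i := by
                  rcases hbi with hlt | ⟨-, hlt⟩
                  · exact absurd (hbs ▸ hlt) (lt_irrefl _)
                  · exact hlt
                exact Or.inr (ihb.mpr ⟨List.mem_cons.mpr (Or.inr hit'), b, List.mem_cons_self .., hbs, hblt⟩)
            · exact Or.inr (ihb.mpr ⟨hit, j, hjt, hjs, hji⟩)

/-- Signature lookup in the sigs table B builds: on indices of range(m) it is the row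
signature itself. -/
lemma sig_lookup (σ : Int → String) (m i : Int) (hi : i ∈ PySem.List.pyRange 0 m 1) :
    PySem.List.pyGetD ((PySem.List.pyRange 0 m 1).map σ) i "" = σ i := by
  rcases PySem.List.mem_pyRange_one.mp hi with ⟨h0, h1⟩
  have hm : (m.toNat : Int) = m := Int.toNat_of_nonneg (le_of_lt (lt_of_le_of_lt h0 h1))
  have hk : (i.toNat : Int) = i := Int.toNat_of_nonneg h0
  have := PySem.List.pyGetD_map_pyRange σ m.toNat i.toNat ""
    (by omega)
  rw [hm, hk] at this
  exact this

-- ===== VERDICT (by name: the statement is the Claim_ definition above) =====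
theorem repeatedRows_spec : Claim_equal_repeatedRows := by
  unfold Claim_equal_repeatedRows
  intro arr m n _ _
  unfold Spec_repeatedRows
  set σ := pvRowSig arr n with hσdef
  set l := PySem.List.pyRange 0 m 1 with hldef
  have hpl : l.Pairwise (· < ·) := PySem.List.pairwise_lt_pyRange_one 0 m
  have hl : l.Nodup := hpl.imp fun h => ne_of_lt h
  have hsigs : (l.foldl (fun sigs i => sigs ++ [σ i]) ([] : List String)) = l.map σ := by
    simpa using PySem.List.foldl_append_singleton_eq_map σ l []
  set σ' : Int → String := fun i => PySem.List.pyGetD (l.map σ) i "" with hσ'def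
  set order : List Int :=
    PySem.List.sorted l (fun i => toLex (σ' i, i)) false with horderdef
  have hA : repeatedRows arr m n
      = PySem.List.sorted (pvResA σ l) (fun x => x) false := rfl
  have hB : repeatedRows_alt arr m n
      = PySem.List.sorted (pvDup σ' order) (fun x => x) false := by
    show PySem.List.sorted
        ((List.zip (PySem.List.sorted l
            (fun i => toLex (PySem.List.pyGetD (l.foldl (fun sigs i => sigs ++ [σ i]) []) i "", i)) false)
          (PySem.List.slice (PySem.List.sorted l
            (fun i => toLex (PySem.List.pyGetD (l.foldl (fun sigs i => sigs ++ [σ i]) []) i "", i)) false)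
            (some 1) none)).foldl
          (fun res p =>
            if PySem.List.pyGetD (l.foldl (fun sigs i => sigs ++ [σ i]) []) p.1 ""
                == PySem.List.pyGetD (l.foldl (fun sigs i => sigs ++ [σ i]) []) p.2 ""
            then res ++ [p.2] else res) [])
        (fun x => x) false
      = PySem.List.sorted (pvDup σ' order) (fun x => x) false
    rw [hsigs, PySem.List.slice_from_one]
    rw [PySem.List.foldl_append_if (fun p : Int × Int => σ' p.1 == σ' p.2) (fun p => p.2)]
    rw [List.nil_append, ← horderdef]
    congr 1
    exact zip_filter_eq_pvDup σ' order
  rw [hA, hB, resA_eq_flatMap]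
  have hperm : order.Perm l := PySem.List.sorted_perm l _ false
  have hord_nodup : order.Nodup := hperm.symm.nodup hl
  have hord_le : order.Pairwise
      (fun a b => (toLex (σ' a, a) : Lex (String × Int)) ≤ toLex (σ' b, b)) :=
    PySem.List.sorted_pairwise l (fun i => toLex (σ' i, i))
  have hord_r : order.Pairwise (pvR σ') := by
    refine (hord_le.and hord_nodup).imp ?_
    rintro a b ⟨hle, hne⟩
    rcases Prod.Lex.le_iff.mp hle with hlt | ⟨heq, hle'⟩
    · exact Or.inl hlt
    · exact Or.inr ⟨heq, lt_of_le_of_ne hle' (by simpa using hne)⟩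
  apply (PySem.List.sorted_id_eq_sorted_id_iff_perm _ _).mpr
  apply (List.perm_ext_iff_of_nodup
    (nodup_flatMap_sig σ _
      (fun k => ((hl.filter _).sublist (List.drop_sublist _ _)))
      (fun k i hi => by
        have h := List.mem_filter.mp ((List.drop_sublist _ _).subset hi)
        simpa using h.2)
      _ (PySem.Set.nodup_ofList _))
    (((pvDup_sublist σ' order).trans (List.tail_sublist order)).nodup hord_nodup)).mpr
  have hsl : ∀ x ∈ l, σ' x = σ x := by
    intro x hx
    show PySem.List.pyGetD (l.map σ) x "" = σ x
    rw [hldef]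
    exact sig_lookup σ m x (hldef ▸ hx)
  intro i
  rw [memA σ l hpl i, mem_pvDup σ' order hord_r i]
  constructor
  · rintro ⟨hi, j, hj, hjs, hji⟩
    refine ⟨hperm.symm.subset hi, j, hperm.symm.subset hj, ?_, hji⟩
    rw [hsl j hj, hsl i hi]
    exact hjs
  · rintro ⟨hi, j, hj, hjs, hji⟩
    have hi' : i ∈ l := hperm.subset hi
    have hj' : j ∈ l := hperm.subset hj
    refine ⟨hi', j, hj', ?_, hji⟩
    rw [hsl j hj', hsl i hi'] at hjs
    exact hjs
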